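-- pv_equiv track=rewrite | github.com/arajani1/Corpus-Search-Engine | helper.py | transferDict
-- ===== SOURCE A (Python) =====
-- def transferDict(theList, string):
--     theDict = {}
--
--     for word in theList:
--         try:
--             theDict[word].append(string)
--         except KeyError:
--             theDict[word] = [string]
--
--     return theDict
-- ===== SOURCE B (Python) =====
-- def transferDict(theList, string):
--     # Two passes: count each word (first-occurrence order), then materialize
--     # each value as [string] * count.
--     counts = {}
--     for word in theList:
--         counts[word] = counts.get(word, 0) + 1
--     return {word: [string] * count for word, count in counts.items()}
-- ===== Notes on version B (the rewrite author's own statement) =====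
-- stated objective: alternative
-- what changed: Replaces the per-element try/append loop with a count-then-materialize shape: one counting pass over the list, then each value is built at once as [string]*count.
import Mathlib
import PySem

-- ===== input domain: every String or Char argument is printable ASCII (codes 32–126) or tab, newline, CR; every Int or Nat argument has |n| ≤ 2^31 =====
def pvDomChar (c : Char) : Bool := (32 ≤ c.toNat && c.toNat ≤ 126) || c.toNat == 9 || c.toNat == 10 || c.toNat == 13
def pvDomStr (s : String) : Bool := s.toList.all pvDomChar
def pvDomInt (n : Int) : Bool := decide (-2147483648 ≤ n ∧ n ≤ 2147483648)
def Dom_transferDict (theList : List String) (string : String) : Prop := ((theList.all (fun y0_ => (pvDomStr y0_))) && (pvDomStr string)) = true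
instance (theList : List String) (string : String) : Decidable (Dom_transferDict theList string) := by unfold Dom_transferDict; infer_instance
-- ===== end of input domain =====

-- B replaces A's per-element try/append loop by a counting pass followed by
-- materializing each value as [string] * count (alternative decomposition, same cost).

-- ===== PORT A =====
-- try: theDict[word].append(string) except KeyError: theDict[word] = [string]
def transferDict (theList : List String) (string : String) : List (String × List String) :=
  (theList.foldl (fun d word =>
    match d.get? word with
    | some l => d.insert word (l ++ [string])   -- in-place append (overwrite keeps position)
    | none   => d.insert word [string])
    (PySem.Dict.empty : PySem.Dict String (List String))).items

-- ===== PORT B =====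
def transferDict_alt (theList : List String) (string : String) : List (String × List String) :=
  let counts := theList.foldl (fun d word => d.insert word (d.getD word 0 + 1))
    (PySem.Dict.empty : PySem.Dict String Int)
  counts.items.map (fun p => (p.1, List.replicate p.2.toNat string))

-- ===== PRECONDITION & SPEC =====
def Spec_transferDict (theList : List String) (string : String) (out : List (String × List String)) : Prop := out = transferDict_alt theList string
instance (theList : List String) (string : String) (out : List (String × List String)) : Decidable (Spec_transferDict theList string out) := by unfold Spec_transferDict; infer_instance

-- ===== CLAIM (what is proved, stated in full; the proofs are below) =====
def Claim_equal_transferDict : Prop := ∀ (theList : List String) (string : String), Dom_transferDict theList string → Spec_transferDict theList string (transferDict theList string)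

-- ===== LEMMAS AND PROOFS =====

-- A's loop body (get?-match, then insert) is exactly Dict.modify with default [].
theorem stepA_eq_modify (d : PySem.Dict String (List String)) (word string : String) :
    (match d.get? word with
      | some l => d.insert word (l ++ [string])
      | none   => d.insert word [string]) = d.modify word [] (· ++ [string]) := by
  cases h : d.get? word with
  | some l =>
    simp [PySem.Dict.modify, PySem.Dict.getD_eq_get?_getD, h]
  | none =>
    simp [PySem.Dict.modify, PySem.Dict.getD_eq_get?_getD, h]

-- the A-side fold as a pair-fold, so getD_foldl_modify_append applies
theorem foldA_eq (theList : List String) (string : String) :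
    theList.foldl (fun d word =>
      match d.get? word with
      | some l => d.insert word (l ++ [string])
      | none   => d.insert word [string])
      (PySem.Dict.empty : PySem.Dict String (List String))
    = (theList.map (fun w => (w, string))).foldl
        (fun d p => d.modify p.1 [] (· ++ [p.2]))
        (PySem.Dict.empty : PySem.Dict String (List String)) := by
  rw [List.foldl_map]
  have hfun : (fun (d : PySem.Dict String (List String)) word =>
      match d.get? word with
      | some l => d.insert word (l ++ [string])
      | none   => d.insert word [string])
      = fun d word => d.modify word [] (· ++ [string]) := by
    funext d w; exact stepA_eq_modify d w string
  rw [hfun]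

theorem filterMap_eq_replicate (theList : List String) (string c : String) :
    ((theList.map (fun w => (w, string))).filter (fun p => p.1 == c)).map (·.2)
      = List.replicate (theList.count c) string := by
  induction theList with
  | nil => simp
  | cons x xs ih =>
    by_cases h : x = c
    · subst h
      simp [List.replicate_succ, ih]
    · simp [h, ih]

theorem transferDict_items (theList : List String) (string : String) :
    transferDict theList string
      = (PySem.Set.ofList theList).map
          (fun k => (k, List.replicate (theList.count k) string)) := by
  unfold transferDict
  rw [foldA_eq]
  have hnd : ((theList.map (fun w => (w, string))).foldl
      (fun d p => d.modify p.1 [] (· ++ [p.2]))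
      (PySem.Dict.empty : PySem.Dict String (List String))).keys.Nodup := by
    apply PySem.Dict.nodup_keys_foldl_modify_key
    simp
  rw [PySem.Dict.items_eq_map_keys _ hnd []]
  have hkeys : ((theList.map (fun w => (w, string))).foldl
      (fun d p => d.modify p.1 [] (· ++ [p.2]))
      (PySem.Dict.empty : PySem.Dict String (List String))).keys
      = PySem.Set.ofList theList := by
    rw [PySem.Dict.keys_foldl_modify_key]
    simp [PySem.Set.update, PySem.Set.ofList, PySem.Dict.keys_empty, Function.comp_def]
  rw [hkeys]
  apply List.map_congr_left
  intro k _
  rw [PySem.Dict.getD_foldl_modify_append]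
  simp [PySem.Dict.getD_empty, filterMap_eq_replicate]

theorem transferDict_alt_items (theList : List String) (string : String) :
    transferDict_alt theList string
      = (PySem.Set.ofList theList).map
          (fun k => (k, List.replicate (theList.count k) string)) := by
  unfold transferDict_alt
  rw [PySem.Dict.foldl_insert_getD_add_one_eq_counter]
  simp only [PySem.Dict.items_counter, List.map_map]
  apply List.map_congr_left
  intro k _
  simp

-- ===== VERDICT (by name: the statement is the Claim_ definition above) =====
theorem transferDict_spec : Claim_equal_transferDict := by
  intro theList string _
  unfold Spec_transferDict
  rw [transferDict_items, transferDict_alt_items]
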